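-- pv_equiv track=rewrite | github.com/mixvlad/2025_05_24_Olymp_PT | B/solution.py | is_satisfactory
-- ===== SOURCE A (Python) =====
-- def is_satisfactory(original, received):
--     if len(original) != len(received):
--         return False
--
--     diff = []
--     for i in range(len(original)):
--         if original[i] != received[i]:
--             diff.append(i)
--             if len(diff) > 2:
--                 return False
--
--     if not diff:
--         return True
--     if len(diff) == 2 and diff[1] == diff[0] + 1:
--         i, j = diff
--         return original[i] == received[j] and original[j] == received[i]
--     return False
-- ===== SOURCE B (Python) =====
-- def is_satisfactory(original, received):
--     if len(original) != len(received):
--         return False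
--     n = len(original)
--     i = 0
--     while i < n and original[i] == received[i]:
--         i += 1
--     if i == n:
--         return True
--     if i + 1 == n:
--         return False
--     return (original[i] == received[i + 1]
--             and original[i + 1] == received[i]
--             and original[i + 2:] == received[i + 2:])
-- ===== Notes on version B (the rewrite author's own statement) =====
-- stated objective: simpler
-- what changed: B replaces A's mismatch-index bookkeeping (collect up to three differing indices, then inspect the list) with a first-mismatch scan followed by a direct adjacent-swap check and a suffix equality comparison.
import Mathlib
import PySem

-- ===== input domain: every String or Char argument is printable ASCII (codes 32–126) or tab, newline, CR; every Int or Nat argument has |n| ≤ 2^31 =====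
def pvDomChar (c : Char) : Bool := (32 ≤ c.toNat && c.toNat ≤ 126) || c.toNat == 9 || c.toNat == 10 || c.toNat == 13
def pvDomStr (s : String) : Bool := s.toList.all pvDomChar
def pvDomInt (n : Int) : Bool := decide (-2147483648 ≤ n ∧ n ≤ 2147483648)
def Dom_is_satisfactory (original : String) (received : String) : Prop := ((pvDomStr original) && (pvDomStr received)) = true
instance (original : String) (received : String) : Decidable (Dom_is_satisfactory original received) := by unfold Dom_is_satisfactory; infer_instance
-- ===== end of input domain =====

-- B locates the first mismatch, then checks the adjacent swap and suffix equality,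
-- instead of A's bookkeeping of up to three differing indices; objective: simpler.

-- ===== PORT A =====
-- the for-loop of A: index recursion over the same state (diff list; none = early `return False`)
def pvCollectDiff (o r : List Char) (i : Nat) (diff : List Nat) : Option (List Nat) :=
  if h : i < o.length then
    if o[i]? ≠ r[i]? then
      let d := diff ++ [i]
      if d.length > 2 then none
      else pvCollectDiff o r (i + 1) d
    else pvCollectDiff o r (i + 1) diff
  else some diff
termination_by o.length - i

-- A's three final `return` statements, on the collected diff list (none = the early `return False`)
def pvCheckDiff (o r : List Char) : Option (List Nat) → Bool
  | none => false
  | some diff =>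
    if diff.isEmpty then true
    else
      match diff with
      | [i, j] =>
        if j = i + 1 then decide (o[i]? = r[j]?) && decide (o[j]? = r[i]?) else false
      | _ => false

def is_satisfactory (original : String) (received : String) : Bool :=
  if original.toList.length ≠ received.toList.length then false
  else pvCheckDiff original.toList received.toList
         (pvCollectDiff original.toList received.toList 0 [])

-- ===== PORT B =====
-- the while-loop of B: recurse past equal prefixes; at the first mismatch check the
-- adjacent swap and compare the remaining suffixes
def pvSwapScan : List Char → List Char → Bool
  | [], [] => true
  | x :: xs, y :: ys =>
    if x = y then pvSwapScan xs ys
    else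
      match xs, ys with
      | x2 :: xs2, y2 :: ys2 => decide (x = y2) && decide (x2 = y) && decide (xs2 = ys2)
      | _, _ => false
  | _, _ => false

def is_satisfactory_alt (original : String) (received : String) : Bool :=
  if original.toList.length ≠ received.toList.length then false
  else pvSwapScan original.toList received.toList

-- ===== PRECONDITION & SPEC =====
def Spec_is_satisfactory (original : String) (received : String) (out : Bool) : Prop := out = is_satisfactory_alt original received
instance (original : String) (received : String) (out : Bool) : Decidable (Spec_is_satisfactory original received out) := by unfold Spec_is_satisfactory; infer_instance

-- ===== CLAIM (what is proved, stated in full; the proofs are below) =====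
def Claim_equal_is_satisfactory : Prop := ∀ (original : String) (received : String), Dom_is_satisfactory original received → Spec_is_satisfactory original received (is_satisfactory original received)

-- ===== LEMMAS AND PROOFS =====

-- positions of the mismatching characters, structurally
def pvMism : List Char → List Char → List Nat
  | x :: xs, y :: ys => (if x ≠ y then [0] else []) ++ (pvMism xs ys).map (· + 1)
  | _, _ => []

-- A's final check, phrased on the full mismatch list
def pvSpecA (o r : List Char) : Bool :=
  match pvMism o r with
  | [] => true
  | [i, j] => if j = i + 1 then decide (o[i]? = r[j]?) && decide (o[j]? = r[i]?) else false
  | _ => false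

theorem pvMism_nil_iff (o r : List Char) (hl : o.length = r.length) :
    pvMism o r = [] ↔ o = r := by
  induction o generalizing r with
  | nil => cases r with
    | nil => simp [pvMism]
    | cons y ys => simp at hl
  | cons x xs ih =>
    cases r with
    | nil => simp at hl
    | cons y ys =>
      simp only [List.length_cons, Nat.add_right_cancel_iff] at hl
      by_cases hxy : x = y <;> simp [pvMism, hxy, ih ys hl]

theorem pvCollectDiff_char (o r : List Char) (hl : o.length = r.length) :
    ∀ k i diff, o.length - i ≤ k → diff.length ≤ 2 →
      pvCollectDiff o r i diff =
        (if diff.length + (pvMism (o.drop i) (r.drop i)).length > 2 then none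
         else some (diff ++ (pvMism (o.drop i) (r.drop i)).map (· + i))) := by
  intro k
  induction k with
  | zero =>
    intro i diff hk hd
    have hi : ¬ i < o.length := by omega
    rw [pvCollectDiff]
    simp only [hi, dif_neg, not_false_iff]
    rw [List.drop_eq_nil_of_le (by omega), List.drop_eq_nil_of_le (by omega)]
    simp [pvMism]
    omega
  | succ k ih =>
    intro i diff hk hd
    by_cases hi : i < o.length
    · have hir : i < r.length := by omega
      have ho : o.drop i = o[i] :: o.drop (i + 1) := List.drop_eq_getElem_cons hi
      have hr : r.drop i = r[i] :: r.drop (i + 1) := List.drop_eq_getElem_cons hir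
      have hoo : o[i]? = some o[i] := List.getElem?_eq_getElem hi
      have hrr : r[i]? = some r[i] := List.getElem?_eq_getElem hir
      have hmap : ∀ (m : List Nat), (m.map (· + 1)).map (· + i) = m.map (· + (i + 1)) := by
        intro m
        rw [List.map_map]
        apply List.map_congr_left
        intro a _
        simp
        omega
      rw [pvCollectDiff, ho, hr]
      simp only [hi, dif_pos, hoo, hrr, pvMism]
      by_cases hxy : o[i] = r[i]
      · simp only [hxy, ne_eq, not_true_eq_false, if_neg, not_false_iff]
        rw [ih (i + 1) diff (by omega) hd]
        simp [hmap]
      · have hne : ¬ (some o[i] = some r[i]) := by simpa using hxy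
        simp only [ne_eq, hne, not_false_iff, if_pos]
        by_cases h3 : (diff ++ [i]).length > 2
        · simp only [h3, if_pos]
          have hlen : 2 < diff.length + ((if o[i] ≠ r[i] then [0] else []) ++
              (pvMism (o.drop (i+1)) (r.drop (i+1))).map (· + 1)).length := by
            simp only [hxy, ne_eq, not_false_iff, if_pos]
            simp at h3 ⊢
            omega
          rw [if_pos hlen]
        · simp only [h3, if_neg, not_false_iff]
          rw [ih (i + 1) (diff ++ [i]) (by omega) (by simp at h3 ⊢; omega)]
          simp [hxy]
          rw [Nat.add_comm 1 i]
          split_ifs with h1 h2 <;> first | rfl | omega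
    · rw [pvCollectDiff]
      simp only [hi, dif_neg, not_false_iff]
      rw [List.drop_eq_nil_of_le (by omega), List.drop_eq_nil_of_le (by omega)]
      simp [pvMism]
      omega

theorem pvMism_self (l : List Char) : pvMism l l = [] := by
  induction l with
  | nil => rfl
  | cons x xs ih => simp [pvMism, ih]

theorem pvSwapScan_eq_specA (o r : List Char) (hl : o.length = r.length) :
    pvSwapScan o r = pvSpecA o r := by
  induction o generalizing r with
  | nil =>
    cases r with
    | nil => simp [pvSwapScan, pvSpecA, pvMism]
    | cons y ys => simp at hl
  | cons x xs ih =>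
    cases r with
    | nil => simp at hl
    | cons y ys =>
      simp only [List.length_cons, Nat.add_right_cancel_iff] at hl
      by_cases hxy : x = y
      · subst hxy
        have hL : pvSwapScan (x :: xs) (x :: ys) = pvSwapScan xs ys := by
          simp [pvSwapScan]
        rw [hL, ih ys hl]
        unfold pvSpecA
        simp only [pvMism, ne_eq, not_true_eq_false, List.nil_append, if_neg,
          not_false_iff]
        cases hm : pvMism xs ys with
        | nil => simp
        | cons a t =>
          cases t with
          | nil => simp
          | cons b t2 =>
            cases t2 with
            | nil =>
              simp only [List.map_cons, List.map_nil]
              by_cases hba : b = a + 1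
              · subst hba
                simp only [List.getElem?_cons_succ]
                exact if_congr Iff.rfl rfl rfl
              · have hba' : ¬ (b + 1 = a + 1 + 1) := by omega
                simp [hba]
            | cons c t3 => simp
      · -- first mismatch at the head
        have hR : pvMism (x :: xs) (y :: ys) = 0 :: (pvMism xs ys).map (· + 1) := by
          simp [pvMism, hxy]
        cases xs with
        | nil =>
          cases ys with
          | nil =>
            unfold pvSpecA
            rw [hR]
            simp [pvSwapScan, pvMism, hxy]
          | cons y2 ys2 => simp at hl
        | cons x2 xs2 =>
          cases ys with
          | nil => simp at hl
          | cons y2 ys2 =>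
            simp only [List.length_cons, Nat.add_right_cancel_iff] at hl
            have hL : pvSwapScan (x :: x2 :: xs2) (y :: y2 :: ys2) =
                (decide (x = y2) && decide (x2 = y) && decide (xs2 = ys2)) := by
              simp [pvSwapScan, hxy]
            rw [hL]
            unfold pvSpecA
            rw [hR]
            cases hm : pvMism (x2 :: xs2) (y2 :: ys2) with
            | nil =>
              -- no further mismatch: the tails are equal, so a true swap needs x = y
              have hxs : x2 :: xs2 = y2 :: ys2 :=
                (pvMism_nil_iff _ _ (by simp [hl])).mp hm
              have hx2 : x2 = y2 := by injection hxs
              simp only [List.map_nil]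
              cases hq : (decide (x = y2) && decide (x2 = y) && decide (xs2 = ys2)) with
              | false => rfl
              | true =>
                simp only [Bool.and_eq_true, decide_eq_true_eq] at hq
                exact (hxy (by rw [hq.1.1, ← hx2, hq.1.2])).elim
            | cons a t =>
              cases t with
              | nil =>
                -- exactly one further mismatch at position a
                simp only [List.map_cons, List.map_nil]
                by_cases ha : a = 0
                · subst ha
                  -- mism = [0, 1]: the adjacent-swap case
                  have hm' : x2 ≠ y2 ∧ pvMism xs2 ys2 = [] := by
                    by_cases h22 : x2 = y2
                    · subst h22
                      simp only [pvMism, ne_eq, not_true_eq_false, ite_false,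
                        List.nil_append] at hm
                      cases hmm : pvMism xs2 ys2 with
                      | nil => rw [hmm] at hm; simp at hm
                      | cons u t => rw [hmm] at hm; simp at hm
                    · refine ⟨h22, ?_⟩
                      simp only [pvMism, ne_eq, h22, not_false_iff, ite_true,
                        List.cons_append, List.nil_append] at hm
                      cases hmm : pvMism xs2 ys2 with
                      | nil => rfl
                      | cons u t => rw [hmm] at hm; simp at hm
                  have hsuf : xs2 = ys2 := (pvMism_nil_iff _ _ hl).mp hm'.2
                  simp only [List.getElem?_cons_zero, List.getElem?_cons_succ]
                  simp [hsuf]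
                · -- first further mismatch not adjacent: both sides false
                  have hne : ¬ (a + 1 = 0 + 1) := by omega
                  rw [if_neg hne]
                  have hsne : ¬ (x2 :: xs2 = y2 :: ys2) := by
                    intro he
                    rw [he, pvMism_self] at hm
                    simp at hm
                  cases hq : (decide (x = y2) && decide (x2 = y) && decide (xs2 = ys2)) with
                  | false => rfl
                  | true =>
                    simp only [Bool.and_eq_true, decide_eq_true_eq] at hq
                    -- a ≠ 0 forces x2 = y2; with xs2 = ys2 the tails are equal, contradiction
                    have h22 : x2 = y2 := by
                      by_contra h22
                      simp only [pvMism, ne_eq, h22, not_false_iff, ite_true,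
                        List.cons_append, List.nil_append] at hm
                      have ha0 : a = 0 := by
                        injection hm with h1 _
                        omega
                      exact ha ha0
                    exact (hsne (by rw [h22, hq.2])).elim
              | cons b t2 =>
                -- three or more mismatches: both sides false
                simp only [List.map_cons]
                have hsne : ¬ (xs2 = ys2) := by
                  intro he
                  have h2 : (pvMism (x2 :: xs2) (y2 :: ys2)).length ≤ 1 := by
                    simp [pvMism, he, pvMism_self]
                    split_ifs <;> simp
                  rw [hm] at h2
                  simp at h2
                cases hq : (decide (x = y2) && decide (x2 = y) && decide (xs2 = ys2)) with
                | false => rfl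
                | true =>
                  simp only [Bool.and_eq_true, decide_eq_true_eq] at hq
                  exact (hsne hq.2).elim

theorem pvA_eq_specA (o r : List Char) (hl : o.length = r.length) :
    pvCheckDiff o r (pvCollectDiff o r 0 []) = pvSpecA o r := by
  rw [pvCollectDiff_char o r hl o.length 0 [] (by omega) (by simp)]
  simp only [List.drop_zero, List.length_nil, Nat.zero_add, List.nil_append]
  have hmap : (pvMism o r).map (· + 0) = pvMism o r := by simp
  rw [hmap]
  unfold pvSpecA pvCheckDiff
  cases hm : pvMism o r with
  | nil => simp
  | cons a t =>
    cases t with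
    | nil => simp
    | cons b t2 =>
      cases t2 with
      | nil => simp
      | cons c t3 => simp

-- ===== VERDICT (by name: the statement is the Claim_ definition above) =====
theorem is_satisfactory_spec : Claim_equal_is_satisfactory := by
  intro original received _
  unfold Spec_is_satisfactory is_satisfactory is_satisfactory_alt
  by_cases hl : original.toList.length = received.toList.length
  · rw [if_neg (not_not_intro hl), if_neg (not_not_intro hl),
      pvSwapScan_eq_specA _ _ hl, pvA_eq_specA _ _ hl]
  · rw [if_pos hl, if_pos hl]
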